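-- pv_equiv track=rewrite | github.com/akuprym/yandex_algorithm_contest_6.0 | contest_2/task-H.py | append_prefix
-- ===== SOURCE A (Python) =====
-- def append_prefix(arr: list[int], reverse=False) -> list[int]:
--     prefix = [0 for _ in range(len(arr))]
--     if reverse:
--         arr.reverse()
--     curr = 0
--     for i in range(1, len(arr)):
--         curr += arr[i - 1]
--         prefix[i] = prefix[i - 1] + curr
--     if reverse:
--         prefix.reverse()
--     return prefix
-- ===== SOURCE B (Python) =====
-- def append_prefix(arr: list[int], reverse=False) -> list[int]:
--     # Like the original, permanently reverses arr in place when reverse=True.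
--     if reverse:
--         arr.reverse()
--     s1 = []
--     t = 0
--     for x in arr:      # first-order prefix sums
--         t += x
--         s1.append(t)
--     s2 = []
--     t = 0
--     for x in s1:       # second-order prefix sums
--         t += x
--         s2.append(t)
--     prefix = [0] + s2[:-1] if arr else []
--     if reverse:
--         prefix.reverse()
--     return prefix
-- ===== Notes on version B (the rewrite author's own statement) =====
-- stated objective: simpler
-- what changed: Replaces A's single index loop that writes into a preallocated zero list (prefix[i] = prefix[i-1] + running sum) by two plain accumulate passes (prefix sums, then prefix sums of those) and prepending the leading 0.
import Mathlib
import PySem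

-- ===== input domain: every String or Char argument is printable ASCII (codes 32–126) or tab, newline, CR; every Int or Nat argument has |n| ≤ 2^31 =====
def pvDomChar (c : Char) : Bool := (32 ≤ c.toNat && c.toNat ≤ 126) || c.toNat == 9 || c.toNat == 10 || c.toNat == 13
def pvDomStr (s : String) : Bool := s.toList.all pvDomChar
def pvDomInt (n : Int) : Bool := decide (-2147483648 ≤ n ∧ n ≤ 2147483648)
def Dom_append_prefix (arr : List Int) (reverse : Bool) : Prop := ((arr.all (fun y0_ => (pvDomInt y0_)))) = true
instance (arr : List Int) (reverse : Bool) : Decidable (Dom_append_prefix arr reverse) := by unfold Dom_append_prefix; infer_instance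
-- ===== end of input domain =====

-- B replaces A's single index loop over a preallocated zero list by two plain
-- prefix-sum passes (accumulate twice) and prepends the leading 0; objective: simpler.
-- Both A and B permanently reverse arr in place when reverse=True; the theorems are about the return value.


-- ===== PORT A =====
def append_prefix (arr : List Int) (reverse : Bool) : List Int :=
  let prefix0 := List.replicate arr.length (0 : Int)
  let a := if reverse then arr.reverse else arr
  let st := (PySem.List.pyRange 1 (a.length : Int) 1).foldl
    (fun (st : List Int × Int) i =>
      let curr := st.2 + PySem.List.pyGetD a (i - 1) 0
      (PySem.List.pySetD st.1 i (PySem.List.pyGetD st.1 (i - 1) 0 + curr), curr))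
    (prefix0, 0)
  if reverse then st.1.reverse else st.1

-- ===== PORT B =====
-- running prefix sums: the two append-accumulator loops of Source B
def scanSum : Int → List Int → List Int
  | _, [] => []
  | t, x :: xs => (t + x) :: scanSum (t + x) xs

def append_prefix_alt (arr : List Int) (reverse : Bool) : List Int :=
  let a := if reverse then arr.reverse else arr
  let s1 := scanSum 0 a
  let s2 := scanSum 0 s1
  let pfx := if a.isEmpty then [] else 0 :: s2.dropLast
  if reverse then pfx.reverse else pfx

-- ===== PRECONDITION & SPEC =====
def Spec_append_prefix (arr : List Int) (reverse : Bool) (out : List Int) : Prop := out = append_prefix_alt arr reverse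
instance (arr : List Int) (reverse : Bool) (out : List Int) : Decidable (Spec_append_prefix arr reverse out) := by unfold Spec_append_prefix; infer_instance

-- ===== CLAIM (what is proved, stated in full; the proofs are below) =====
def Claim_equal_append_prefix : Prop := ∀ (arr : List Int) (reverse : Bool), Dom_append_prefix arr reverse → Spec_append_prefix arr reverse (append_prefix arr reverse)

-- ===== LEMMAS AND PROOFS =====

theorem scanSum_length (t : Int) (l : List Int) : (scanSum t l).length = l.length := by
  induction l generalizing t with
  | nil => rfl
  | cons x xs ih => simp [scanSum, ih]

theorem scanSum_getD (t : Int) (l : List Int) (j : Nat) (hj : j < l.length) :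
    (scanSum t l).getD j 0 = t + (l.take (j + 1)).sum := by
  induction l generalizing t j with
  | nil => simp at hj
  | cons x xs ih =>
    cases j with
    | zero => simp [scanSum]
    | succ j =>
      simp only [scanSum, List.getD_cons_succ, List.take_succ_cons, List.sum_cons]
      rw [ih (t + x) j (by simpa using hj)]
      ring

theorem take_succ_sum (l : List Int) (j : Nat) (hj : j < l.length) :
    (l.take (j + 1)).sum = (l.take j).sum + l.getD j 0 := by
  rw [List.take_add_one, List.sum_append]
  simp only [List.getD, List.getElem?_eq_getElem hj, Option.toList_some, List.sum_cons,
    List.sum_nil, Option.getD_some, add_zero]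

theorem inv_lemma (a : List Int) (k : Nat) (h1 : 1 ≤ k) (h2 : k ≤ a.length) :
    (PySem.List.pyRange 1 (k : Int) 1).foldl
      (fun (st : List Int × Int) i =>
        (PySem.List.pySetD st.1 i (PySem.List.pyGetD st.1 (i - 1) 0 + (st.2 + PySem.List.pyGetD a (i - 1) 0)),
         st.2 + PySem.List.pyGetD a (i - 1) 0))
      (List.replicate a.length 0, 0)
    = ((0 :: (scanSum 0 (scanSum 0 a)).take (k - 1)) ++ List.replicate (a.length - k) 0,
       (a.take (k - 1)).sum) := by
  induction k with
  | zero => omega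
  | succ k ih =>
    by_cases hk : k = 0
    · subst hk
      rw [show ((1 : Nat) : Int) = 1 by norm_num, PySem.List.pyRange_one_eq_nil (by norm_num)]
      simp only [List.foldl_nil]
      have hn : a.length = (a.length - 1) + 1 := by omega
      rw [hn, List.replicate_succ]
      simp
    · have hk1 : 1 ≤ k := by omega
      have hk2 : k ≤ a.length := by omega
      have hkl : k < a.length := by omega
      have hrange : PySem.List.pyRange 1 ((k + 1 : Nat) : Int) 1
          = PySem.List.pyRange 1 (k : Int) 1 ++ [(k : Int)] := by
        push_cast
        exact PySem.List.pyRange_one_succ_right (by exact_mod_cast hk1)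
      rw [hrange, List.foldl_append, ih hk1 hk2]
      simp only [List.foldl_cons, List.foldl_nil]
      have hs1len : (scanSum 0 a).length = a.length := scanSum_length 0 a
      have hs2len : (scanSum 0 (scanSum 0 a)).length = a.length := by
        rw [scanSum_length, hs1len]
      -- index (k:Int) - 1 = ((k-1 : Nat) : Int)
      have hidx : (k : Int) - 1 = ((k - 1 : Nat) : Int) := by omega
      -- curr' = sum of a.take k
      have hcurr : (a.take (k - 1)).sum + PySem.List.pyGetD a ((k : Int) - 1) 0
          = (a.take k).sum := by
        rw [hidx, PySem.List.pyGetD_natCast]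
        have := take_succ_sum a (k - 1) (by omega)
        have hk' : k - 1 + 1 = k := by omega
        rw [hk'] at this
        omega
      -- lookup of prefix at k-1
      have hlook : ((0 :: (scanSum 0 (scanSum 0 a)).take (k - 1))
            ++ List.replicate (a.length - k) 0).getD (k - 1) 0
          = ((scanSum 0 a).take (k - 1)).sum := by
        cases Nat.eq_or_lt_of_le hk1 with
        | inl h => simp [← h]
        | inr h =>
          obtain ⟨j, hj⟩ : ∃ j, k - 1 = j + 1 := ⟨k - 2, by omega⟩
          rw [hj, List.cons_append, List.getD_cons_succ]
          have hjlt : j < ((scanSum 0 (scanSum 0 a)).take (j + 1)).length := by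
            rw [List.length_take]; omega
          rw [List.getD_append _ _ _ _ hjlt]
          have heq : ((scanSum 0 (scanSum 0 a)).take (j + 1)).getD j 0
              = (scanSum 0 (scanSum 0 a)).getD j 0 := by
            rw [List.getD, List.getD, List.getElem?_take_of_lt (by omega)]
          rw [heq, scanSum_getD 0 _ j (by rw [hs1len]; omega), zero_add]
      -- new value equals s2 at position k-1
      have hval : ((scanSum 0 a).take (k - 1)).sum + (a.take k).sum
          = (scanSum 0 (scanSum 0 a)).getD (k - 1) 0 := by
        rw [scanSum_getD 0 _ (k - 1) (by rw [hs1len]; omega)]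
        have hk' : k - 1 + 1 = k := by omega
        rw [hk']
        have hts := take_succ_sum (scanSum 0 a) (k - 1) (by rw [hs1len]; omega)
        rw [hk'] at hts
        rw [hts, scanSum_getD 0 a (k - 1) (by omega), hk']
        ring
      -- the set step
      have hset : PySem.List.pySetD
            ((0 :: (scanSum 0 (scanSum 0 a)).take (k - 1)) ++ List.replicate (a.length - k) 0)
            (k : Int) ((scanSum 0 (scanSum 0 a)).getD (k - 1) 0)
          = (0 :: (scanSum 0 (scanSum 0 a)).take k) ++ List.replicate (a.length - (k + 1)) 0 := by
        rw [PySem.List.pySetD_natCast]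
        have hlen : (0 :: (scanSum 0 (scanSum 0 a)).take (k - 1)).length = k := by
          simp [List.length_take, hs2len]; omega
        rw [List.set_append]
        rw [hlen]
        simp only [lt_irrefl, Nat.sub_self]
        have hrep : List.replicate (a.length - k) (0 : Int)
            = 0 :: List.replicate (a.length - (k + 1)) 0 := by
          have : a.length - k = (a.length - (k + 1)) + 1 := by omega
          rw [this, List.replicate_succ]
        rw [hrep, List.set_cons_zero]
        have htake : (scanSum 0 (scanSum 0 a)).take k
            = (scanSum 0 (scanSum 0 a)).take (k - 1) ++ [(scanSum 0 (scanSum 0 a)).getD (k - 1) 0] := by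
          obtain ⟨j, hj⟩ : ∃ j, k = j + 1 := ⟨k - 1, by omega⟩
          subst hj
          simp only [Nat.add_sub_cancel]
          have hlt : j < (scanSum 0 (scanSum 0 a)).length := by rw [hs2len]; omega
          rw [List.take_add_one, List.getElem?_eq_getElem hlt]
          simp [List.getD, List.getElem?_eq_getElem hlt]
        rw [htake]
        simp [List.append_assoc]
      rw [hcurr, hidx, PySem.List.pyGetD_natCast, hlook]
      refine Prod.ext ?_ ?_
      · show PySem.List.pySetD _ (k : Int) _ = _
        rw [hval, hset]
        norm_num
      · show (a.take k).sum = (a.take (k + 1 - 1)).sum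
        norm_num

theorem core_lemma (a : List Int) :
    ((PySem.List.pyRange 1 (a.length : Int) 1).foldl
      (fun (st : List Int × Int) i =>
        (PySem.List.pySetD st.1 i (PySem.List.pyGetD st.1 (i - 1) 0 + (st.2 + PySem.List.pyGetD a (i - 1) 0)),
         st.2 + PySem.List.pyGetD a (i - 1) 0))
      (List.replicate a.length 0, 0)).1
    = if a.isEmpty then [] else 0 :: (scanSum 0 (scanSum 0 a)).dropLast := by
  by_cases h : a = []
  · subst h; rfl
  · have hn : 1 ≤ a.length := by
      cases a with
      | nil => exact absurd rfl h
      | cons x xs => simp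
    rw [inv_lemma a a.length hn le_rfl]
    have hs2len : (scanSum 0 (scanSum 0 a)).length = a.length := by
      rw [scanSum_length, scanSum_length]
    simp only [Nat.sub_self, List.replicate_zero, List.append_nil]
    rw [List.dropLast_eq_take, hs2len]
    simp [h]

-- ===== VERDICT (by name: the statement is the Claim_ definition above) =====
theorem append_prefix_spec : Claim_equal_append_prefix := by
  intro arr reverse _
  show append_prefix arr reverse = append_prefix_alt arr reverse
  cases reverse with
  | false =>
    simp only [append_prefix, append_prefix_alt]
    exact core_lemma arr
  | true =>
    simp only [append_prefix, append_prefix_alt, reduceIte]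
    rw [List.length_reverse]
    have h := core_lemma arr.reverse
    rw [List.length_reverse] at h
    rw [h]
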